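-- pv_equiv track=rewrite | github.com/itda-skills/skills.pub | itda-gov/skills/dart/scripts/dart_api.py | _match_account
-- ===== SOURCE A (Python) =====
-- def _match_account(
--     account_nm: str,
--     search_accounts: list[str],
-- ) -> str | None:
--     """계정명 매칭: 정확 일치 우선, 없으면 부분 일치 fallback.
--
--     Args:
--         account_nm: DART 계정명.
--         search_accounts: 검색할 계정명 목록.
--
--     Returns:
--         매칭된 검색 계정명, 없으면 None.
--     """
--     # 정확 일치 우선
--     for acct in search_accounts:
--         if account_nm == acct:
--             return acct
--     # 부분 일치 fallback
--     for acct in search_accounts: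
--         if acct in account_nm or account_nm in acct:
--             return acct
--     return None
-- ===== SOURCE B (Python) =====
-- def _match_account(
--     account_nm: str,
--     search_accounts: list[str],
-- ) -> str | None:
--     """Single pass: return first exact match immediately; remember first partial as fallback."""
--     fallback = None
--     for acct in search_accounts:
--         if account_nm == acct:
--             return acct
--         if fallback is None and (acct in account_nm or account_nm in acct):
--             fallback = acct
--     return fallback
-- ===== Notes on version B (the rewrite author's own statement) =====
-- stated objective: simpler
-- what changed: Merged A's two sequential scans into one loop that returns on the first exact match and remembers the first partial match in a fallback variable.
import Mathlib
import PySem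

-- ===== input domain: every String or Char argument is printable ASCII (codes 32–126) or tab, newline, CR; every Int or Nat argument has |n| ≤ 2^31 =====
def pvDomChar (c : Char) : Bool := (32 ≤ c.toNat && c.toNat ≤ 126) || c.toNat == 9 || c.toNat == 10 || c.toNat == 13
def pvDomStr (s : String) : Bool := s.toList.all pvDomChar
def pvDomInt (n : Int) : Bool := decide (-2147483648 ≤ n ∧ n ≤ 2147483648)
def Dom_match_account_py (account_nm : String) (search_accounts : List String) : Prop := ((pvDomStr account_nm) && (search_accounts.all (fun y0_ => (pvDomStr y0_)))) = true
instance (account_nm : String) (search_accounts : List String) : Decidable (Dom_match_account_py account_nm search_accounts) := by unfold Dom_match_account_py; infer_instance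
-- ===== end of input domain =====

-- B merges A's two sequential scans into a single loop with a remembered first-partial fallback (objective: simpler).

-- ===== PORT A =====
-- first loop of A: exact match
def pvExactLoop (account_nm : String) : List String → Option String
  | [] => none
  | acct :: rest => if account_nm == acct then some acct else pvExactLoop account_nm rest

-- second loop of A: partial match
def pvPartialLoop (account_nm : String) : List String → Option String
  | [] => none
  | acct :: rest =>
      if PySem.Str.isIn acct account_nm || PySem.Str.isIn account_nm acct then some acct
      else pvPartialLoop account_nm rest

def match_account_py (account_nm : String) (search_accounts : List String) : Option String :=
  match pvExactLoop account_nm search_accounts with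
  | some acct => some acct
  | none => pvPartialLoop account_nm search_accounts

-- ===== PORT B =====
-- single pass with a fallback accumulator
def pvBLoop (account_nm : String) (fallback : Option String) : List String → Option String
  | [] => fallback
  | acct :: rest =>
      if account_nm == acct then some acct
      else
        pvBLoop account_nm
          (if fallback.isNone && (PySem.Str.isIn acct account_nm || PySem.Str.isIn account_nm acct)
           then some acct else fallback) rest

def match_account_py_alt (account_nm : String) (search_accounts : List String) : Option String :=
  pvBLoop account_nm none search_accounts

-- ===== PRECONDITION & SPEC =====
def Spec_match_account_py (account_nm : String) (search_accounts : List String) (out : Option String) : Prop := out = match_account_py_alt account_nm search_accounts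
instance (account_nm : String) (search_accounts : List String) (out : Option String) : Decidable (Spec_match_account_py account_nm search_accounts out) := by unfold Spec_match_account_py; infer_instance

-- ===== CLAIM (what is proved, stated in full; the proofs are below) =====
def Claim_equal_match_account_py : Prop := ∀ (account_nm : String) (search_accounts : List String), Dom_match_account_py account_nm search_accounts → Spec_match_account_py account_nm search_accounts (match_account_py account_nm search_accounts)

-- ===== LEMMAS AND PROOFS =====
theorem pvBLoop_eq (account_nm : String) (xs : List String) :
    ∀ fb : Option String,
      pvBLoop account_nm fb xs =
        match pvExactLoop account_nm xs with
        | some a => some a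
        | none => match fb with
                  | some f => some f
                  | none => pvPartialLoop account_nm xs := by
  induction xs with
  | nil => intro fb; cases fb <;> simp [pvBLoop, pvExactLoop, pvPartialLoop]
  | cons acct rest ih =>
    intro fb
    by_cases hx : account_nm == acct
    · simp [pvBLoop, pvExactLoop, hx]
    · simp only [pvBLoop, pvExactLoop, pvPartialLoop, hx]
      rw [ih]
      cases fb with
      | some f => simp
      | none => cases pvExactLoop account_nm rest <;> split_ifs <;> simp_all

-- ===== VERDICT (by name: the statement is the Claim_ definition above) =====
theorem match_account_py_spec : Claim_equal_match_account_py := by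
  intro account_nm search_accounts _
  unfold Spec_match_account_py match_account_py match_account_py_alt
  rw [pvBLoop_eq]
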